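-- pv_equiv track=rewrite | github.com/rohan2606/bayou | src/main/python/bayou/experiments/predictMethods_non_prob/SearchDB/utils.py | exact_match_api
-- ===== SOURCE A (Python) =====
-- def exact_match_api(setA, setB):
--
--     if len(setA) != len(setB):
--         return False
--
--     for item in setA:
--         if item not in setB:
--          return False
--     for item in setB:
--         if item not in setA:
--          return False
--
--     return True
-- ===== SOURCE B (Python) =====
-- def exact_match_api(setA, setB):
--     if len(setA) != len(setB):
--         return False
--     return sorted(set(setA)) == sorted(set(setB))
-- ===== Notes on version B (the rewrite author's own statement) =====
-- stated objective: alternative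
-- what changed: Replaces A's two membership-scanning loops by canonicalization: after the length guard, both collections are deduplicated and sorted, and the two canonical sorted lists are compared element-wise; no membership test is ever performed.
import Mathlib
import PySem

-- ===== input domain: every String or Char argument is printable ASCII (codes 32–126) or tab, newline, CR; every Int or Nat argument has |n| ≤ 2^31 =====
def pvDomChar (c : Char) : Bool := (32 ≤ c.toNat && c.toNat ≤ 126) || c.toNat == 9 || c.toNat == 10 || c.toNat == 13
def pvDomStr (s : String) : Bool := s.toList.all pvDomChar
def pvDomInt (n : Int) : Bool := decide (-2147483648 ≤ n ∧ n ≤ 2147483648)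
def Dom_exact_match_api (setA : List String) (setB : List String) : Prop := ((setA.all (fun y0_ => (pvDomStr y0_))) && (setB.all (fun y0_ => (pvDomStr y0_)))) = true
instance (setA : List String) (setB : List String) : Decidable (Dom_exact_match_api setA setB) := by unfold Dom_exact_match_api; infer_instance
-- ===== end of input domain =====

-- B replaces A's two membership-scanning loops by canonicalization: after the length guard
-- it dedups and sorts both collections and compares the canonical sorted lists (objective: alternative).

-- ===== PORT A =====
-- literal transliteration: length guard, then two early-return membership loops
def exact_match_api (setA : List String) (setB : List String) : Bool :=
  if setA.length ≠ setB.length then false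
  else if setA.any (fun item => !(setB.contains item)) then false
  else if setB.any (fun item => !(setA.contains item)) then false
  else true

-- ===== PORT B =====
-- length guard, then sorted(set(setA)) == sorted(set(setB))
def exact_match_api_alt (setA : List String) (setB : List String) : Bool :=
  if setA.length ≠ setB.length then false
  else decide (PySem.List.sorted (PySem.Set.ofList setA) (fun x => x) false
             = PySem.List.sorted (PySem.Set.ofList setB) (fun x => x) false)

-- ===== PRECONDITION & SPEC =====
def Spec_exact_match_api (setA : List String) (setB : List String) (out : Bool) : Prop := out = exact_match_api_alt setA setB
instance (setA : List String) (setB : List String) (out : Bool) : Decidable (Spec_exact_match_api setA setB out) := by unfold Spec_exact_match_api; infer_instance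

-- ===== CLAIM (what is proved, stated in full; the proofs are below) =====
def Claim_equal_exact_match_api : Prop := ∀ (setA : List String) (setB : List String), Dom_exact_match_api setA setB → Spec_exact_match_api setA setB (exact_match_api setA setB)

-- ===== LEMMAS AND PROOFS =====
-- the canonical sorted deduped lists are equal iff the two lists have the same members
theorem pv_canonical_iff (setA setB : List String) :
    (PySem.List.sorted (PySem.Set.ofList setA) (fun x => x) false
       = PySem.List.sorted (PySem.Set.ofList setB) (fun x => x) false) ↔
      ((∀ x ∈ setA, x ∈ setB) ∧ (∀ x ∈ setB, x ∈ setA)) := by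
  rw [PySem.List.sorted_id_eq_sorted_id_iff_perm]
  rw [List.perm_ext_iff_of_nodup (PySem.Set.nodup_ofList _) (PySem.Set.nodup_ofList _)]
  simp only [PySem.Set.mem_ofList]
  constructor
  · intro h
    exact ⟨fun x hx => (h x).mp hx, fun x hx => (h x).mpr hx⟩
  · intro ⟨h1, h2⟩ x
    exact ⟨h1 x, h2 x⟩

-- ===== VERDICT (by name: the statement is the Claim_ definition above) =====
theorem exact_match_api_spec : Claim_equal_exact_match_api := by
  intro setA setB _
  unfold Spec_exact_match_api exact_match_api exact_match_api_alt
  by_cases hl : setA.length = setB.length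
  · simp only [hl, ne_eq, not_true_eq_false, if_false]
    by_cases hc : PySem.List.sorted (PySem.Set.ofList setA) (fun x => x) false
        = PySem.List.sorted (PySem.Set.ofList setB) (fun x => x) false
    · have h := (pv_canonical_iff setA setB).mp hc
      rw [decide_eq_true hc]
      split_ifs with h1 h2
      · exfalso
        obtain ⟨x, hx, hnx⟩ := List.any_eq_true.mp h1
        exact (by simpa using hnx : x ∉ setB) (h.1 x hx)
      · exfalso
        obtain ⟨x, hx, hnx⟩ := List.any_eq_true.mp h2
        exact (by simpa using hnx : x ∉ setA) (h.2 x hx)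
      · rfl
    · have h : ¬ ((∀ x ∈ setA, x ∈ setB) ∧ (∀ x ∈ setB, x ∈ setA)) :=
        fun hcc => hc ((pv_canonical_iff setA setB).mpr hcc)
      rw [decide_eq_false hc]
      split_ifs with h1 h2
      · rfl
      · rfl
      · exfalso
        apply h
        refine ⟨fun x hx => ?_, fun x hx => ?_⟩
        · by_contra hnx
          exact h1 (List.any_eq_true.mpr ⟨x, hx, by simpa using hnx⟩)
        · by_contra hnx
          exact h2 (List.any_eq_true.mpr ⟨x, hx, by simpa using hnx⟩)
  · simp [hl]
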